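-- pv_equiv track=rewrite | github.com/pear96/TIL | Algorithm/src/softeer/전광판.py | count_diff
-- ===== SOURCE A (Python) =====
-- light = [
--     [1, 1, 1, 0, 1, 1, 1],
--     [0, 0, 1, 0, 1, 0, 0],
--     [0, 1, 1, 1, 0, 1, 1],
--     [0, 1, 1, 1, 1, 1, 0],
--     [1, 0, 1, 1, 1, 0, 0],
--     [1, 1, 0, 1, 1, 1, 0],
--     [1, 1, 0, 1, 1, 1, 1],
--     [1, 1, 1, 0, 1, 0, 0],
--     [1, 1, 1, 1, 1, 1, 1],
--     [1, 1, 1, 1, 1, 1, 0]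
-- ]
--
-- def count_diff(a, b):
--     cnt = 0
--     lightA = light[a]
--     lightB = light[b]
--
--     for i in range(7):
--         if lightA[i] != lightB[i]:
--             cnt += 1
--
--     return cnt
-- ===== SOURCE B (Python) =====
-- # 7-segment patterns encoded as 7-bit masks (bit i = segment i of the original row)
-- MASKS = [0b1110111, 0b0010100, 0b1101110, 0b0111110, 0b0011101,
--          0b0111011, 0b1111011, 0b0010111, 0b1111111, 0b0111111]
--
-- def count_diff(a, b):
--     return bin(MASKS[a] ^ MASKS[b]).count('1')
-- ===== Notes on version B (the rewrite author's own statement) =====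
-- stated objective: idiomatic
-- what changed: Replaced the 7-element list table and the explicit position-comparison loop by a table of 7-bit integer masks; count_diff is the standard Hamming-distance idiom: popcount of the XOR of the two masks, with no loop over positions.
import Mathlib
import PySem

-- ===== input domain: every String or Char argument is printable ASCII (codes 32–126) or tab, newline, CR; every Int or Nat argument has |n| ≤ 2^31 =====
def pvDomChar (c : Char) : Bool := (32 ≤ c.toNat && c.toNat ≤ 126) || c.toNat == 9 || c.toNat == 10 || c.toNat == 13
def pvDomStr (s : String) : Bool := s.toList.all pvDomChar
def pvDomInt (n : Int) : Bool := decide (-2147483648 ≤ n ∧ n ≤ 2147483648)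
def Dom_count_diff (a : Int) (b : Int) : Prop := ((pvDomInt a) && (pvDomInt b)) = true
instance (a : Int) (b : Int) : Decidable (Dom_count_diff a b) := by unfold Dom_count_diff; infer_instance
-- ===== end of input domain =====

-- B replaces the per-segment comparison loop with popcount(mask[a] XOR mask[b]) over 7-bit masks (idiomatic Hamming distance).

-- ===== PORT A =====
def light : List (List Int) :=
  [[1, 1, 1, 0, 1, 1, 1],
   [0, 0, 1, 0, 1, 0, 0],
   [0, 1, 1, 1, 0, 1, 1],
   [0, 1, 1, 1, 1, 1, 0],
   [1, 0, 1, 1, 1, 0, 0],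
   [1, 1, 0, 1, 1, 1, 0],
   [1, 1, 0, 1, 1, 1, 1],
   [1, 1, 1, 0, 1, 0, 0],
   [1, 1, 1, 1, 1, 1, 1],
   [1, 1, 1, 1, 1, 1, 0]]

def count_diff (a : Int) (b : Int) : Int :=
  match PySem.List.pyGet? light a, PySem.List.pyGet? light b with
  | some lightA, some lightB =>
      (PySem.List.pyRange 0 7 1).foldl
        (fun cnt i =>
          if PySem.List.pyGet? lightA i ≠ PySem.List.pyGet? lightB i then cnt + 1 else cnt) 0
  | _, _ => 0  -- unreachable under Pre_count_diff (Python raises IndexError here)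

-- ===== PORT B =====
def pvMasks : List Int := [0b1110111, 0b0010100, 0b1101110, 0b0111110, 0b0011101,
                           0b0111011, 0b1111011, 0b0010111, 0b1111111, 0b0111111]

-- bin(x).count('1') for x ≥ 0: count of 1 bits (structural recursion on a halving bound)
def pvPopcountAux : Nat → Nat → Int
  | 0, _ => 0
  | k + 1, n => if n = 0 then 0 else (n % 2 : Int) + pvPopcountAux k (n / 2)

def pvPopcount (n : Nat) : Int := pvPopcountAux n n

def count_diff_alt (a : Int) (b : Int) : Int :=
  -- .getD 0 is unreachable under Pre_count_diff (Python raises IndexError there)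
  ((PySem.List.pyGet? pvMasks a).bind fun ma =>
    (PySem.List.pyGet? pvMasks b).map fun mb =>
      pvPopcount (ma.toNat ^^^ mb.toNat)).getD 0

-- ===== PRECONDITION & SPEC =====
-- Pre_ excludes exactly the indices where Python's light[a]/light[b] raises IndexError (list of length 10, negative indexing allowed).
def Pre_count_diff (a : Int) (b : Int) : Prop := -10 ≤ a ∧ a ≤ 9 ∧ -10 ≤ b ∧ b ≤ 9
instance (a : Int) (b : Int) : Decidable (Pre_count_diff a b) := by unfold Pre_count_diff; infer_instance
def pvWitness_count_diff : Int × Int := (3, 8)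

def Spec_count_diff (a : Int) (b : Int) (out : Int) : Prop := out = count_diff_alt a b
instance (a : Int) (b : Int) (out : Int) : Decidable (Spec_count_diff a b out) := by unfold Spec_count_diff; infer_instance

-- ===== CLAIM (what is proved, stated in full; the proofs are below) =====
def Claim_equal_count_diff : Prop := ∀ (a : Int) (b : Int), Dom_count_diff a b → Pre_count_diff a b → Spec_count_diff a b (count_diff a b)

-- ===== LEMMAS AND PROOFS =====

-- ===== VERDICT (by name: the statement is the Claim_ definition above) =====
theorem count_diff_spec : Claim_equal_count_diff := by
  intro a b _ hpre
  obtain ⟨h1, h2, h3, h4⟩ := hpre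
  unfold Spec_count_diff
  interval_cases a <;> interval_cases b <;> decide
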